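-- pv_equiv track=rewrite | github.com/keksnicoh/opengl_plot_prototype | cllib/algorithm/map.py | _read_factors
-- ===== SOURCE A (Python) =====
-- def _read_factors(descr, postfix='*'):
--     is_number = ['0','1','2','3','4','5','6','7','8','9','.']
--     expr = ''
--     has_chars = False
--     has_symbol = False
--     for char in descr:
--         if char in is_number:
--             if has_symbol:
--                 raise ValueError('numbers are only allowed in front of symbols')
--             expr += char
--             has_chars = True
--         elif char == 'c':
--             if not has_chars:
--                 expr = 'CAARD'
--                 has_chars = True
--             else:
--                 expr += '*CAARD'
--             has_symbol = True
--         elif char == 'd':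
--             if not has_chars:
--                 expr = 'DIM'
--                 has_chars = True
--             else:
--                 expr += '*DIM'
--             has_symbol = True
--
--     return expr+postfix
-- ===== SOURCE B (Python) =====
-- def _read_factors(descr, postfix='*'):
--     numeric = set('0123456789.')
--     sym = {'c': 'CAARD', 'd': 'DIM'}
--     first_sym = next((i for i, ch in enumerate(descr) if ch in sym), None)
--     if first_sym is not None and any(ch in numeric for ch in descr[first_sym:]):
--         raise ValueError('numbers are only allowed in front of symbols')
--     prefix = ''.join(ch for ch in descr if ch in numeric)
--     tokens = [sym[ch] for ch in descr if ch in sym]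
--     return '*'.join(([prefix] if prefix else []) + tokens) + postfix
-- ===== Notes on version B (the rewrite author's own statement) =====
-- stated objective: simpler
-- what changed: Replaces A's single accumulator loop with expr-string concatenation and has_chars/has_symbol flags by three independent passes (find first symbol for the error check, filter the numeric prefix, map symbols to tokens) combined with a single join on the separator.
import Mathlib
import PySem

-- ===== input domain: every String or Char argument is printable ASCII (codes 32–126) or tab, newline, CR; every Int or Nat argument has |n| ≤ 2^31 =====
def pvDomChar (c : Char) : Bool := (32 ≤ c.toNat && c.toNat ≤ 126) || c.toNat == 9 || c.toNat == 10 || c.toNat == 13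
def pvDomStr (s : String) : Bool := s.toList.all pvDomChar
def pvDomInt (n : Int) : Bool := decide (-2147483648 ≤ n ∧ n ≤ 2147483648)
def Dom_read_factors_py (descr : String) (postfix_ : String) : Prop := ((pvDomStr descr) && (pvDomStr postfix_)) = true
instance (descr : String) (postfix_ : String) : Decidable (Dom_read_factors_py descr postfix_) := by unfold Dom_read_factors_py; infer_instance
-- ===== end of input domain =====

-- B replaces A's accumulator loop (expr string + has_chars/has_symbol flags) by three
-- independent passes (find first symbol, filter numeric prefix, map symbols to tokens)
-- glued with a single '*'-join; objective: simpler, same cost.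

-- ===== PORT A =====
-- the literal list `is_number` of A
def numCharsA : List Char := ['0','1','2','3','4','5','6','7','8','9','.']

-- the for-loop of A over (expr, has_chars, has_symbol); `none` = the ValueError raise
def readA : List Char → List Char → Bool → Bool → Option (List Char)
  | [], expr, _, _ => some expr
  | c :: rest, expr, hc, hs =>
    if c ∈ numCharsA then
      if hs then none
      else readA rest (expr ++ [c]) true hs
    else if c = 'c' then
      readA rest (if !hc then ['C','A','A','R','D'] else expr ++ ('*' :: ['C','A','A','R','D'])) true true
    else if c = 'd' then
      readA rest (if !hc then ['D','I','M'] else expr ++ ('*' :: ['D','I','M'])) true true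
    else readA rest expr hc hs

def read_factors_py (descr : String) (postfix_ : String) : String :=
  match readA descr.toList [] false false with
  | some e => String.mk (e ++ postfix_.toList)
  | none => ""   -- unreachable: Pre_ excludes the ValueError inputs

-- ===== PORT B =====
def isNumB (c : Char) : Bool := ['0','1','2','3','4','5','6','7','8','9','.'].contains c
def isSymB (c : Char) : Bool := c == 'c' || c == 'd'
-- the dict sym = {'c': 'CAARD', 'd': 'DIM'} as a lookup
def tokB (c : Char) : List Char := if c == 'c' then ['C','A','A','R','D'] else ['D','I','M']

-- '*'.join of a list of pieces
def joinB : List (List Char) → List Char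
  | [] => []
  | [x] => x
  | x :: xs => x ++ '*' :: joinB xs

-- '*'.join(([prefix] if prefix else []) + tokens)
def buildB (l : List Char) : List Char :=
  joinB ((if l.filter isNumB = [] then [] else [l.filter isNumB]) ++ (l.filter isSymB).map tokB)

def read_factors_py_alt (descr : String) (postfix_ : String) : String :=
  let l := descr.toList
  match l.findIdx? isSymB with
  | some i =>
      if (l.drop i).any isNumB then ""   -- unreachable: Pre_ excludes the ValueError inputs
      else String.mk (buildB l ++ postfix_.toList)
  | none => String.mk (buildB l ++ postfix_.toList)

-- ===== PRECONDITION & SPEC =====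
-- Pre_ excludes exactly the inputs on which A raises ValueError: a digit or '.' occurring
-- after a 'c'/'d' symbol somewhere in descr.
def Pre_read_factors_py (descr : String) (postfix_ : String) : Prop :=
  descr.toList.Pairwise (fun x y => (x = 'c' ∨ x = 'd') → y ∉ numCharsA)
instance (descr : String) (postfix_ : String) : Decidable (Pre_read_factors_py descr postfix_) := by
  unfold Pre_read_factors_py; infer_instance

def pvWitness_read_factors_py : String × String := ("2cd", "*")

def Spec_read_factors_py (descr : String) (postfix_ : String) (out : String) : Prop := out = read_factors_py_alt descr postfix_
instance (descr : String) (postfix_ : String) (out : String) : Decidable (Spec_read_factors_py descr postfix_ out) := by unfold Spec_read_factors_py; infer_instance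

-- ===== CLAIM (what is proved, stated in full; the proofs are below) =====
def Claim_equal_read_factors_py : Prop := ∀ (descr : String) (postfix_ : String), Dom_read_factors_py descr postfix_ → Pre_read_factors_py descr postfix_ → Spec_read_factors_py descr postfix_ (read_factors_py descr postfix_)

-- ===== LEMMAS AND PROOFS =====

theorem num_not_sym : ∀ c ∈ numCharsA, isSymB c = false := by
  intro c hc
  simp only [numCharsA, List.mem_cons, List.not_mem_nil, or_false] at hc
  rcases hc with rfl|rfl|rfl|rfl|rfl|rfl|rfl|rfl|rfl|rfl|rfl <;> rfl

theorem num_isNumB : ∀ c ∈ numCharsA, isNumB c = true := by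
  intro c hc
  simp only [numCharsA, List.mem_cons, List.not_mem_nil, or_false] at hc
  rcases hc with rfl|rfl|rfl|rfl|rfl|rfl|rfl|rfl|rfl|rfl|rfl <;> rfl

theorem isNumB_mem (c : Char) (h : isNumB c = true) : c ∈ numCharsA := by
  simpa [isNumB, numCharsA] using h

theorem joinB_merge (a b : List Char) (ts : List (List Char)) :
    joinB ((a ++ '*' :: b) :: ts) = joinB (a :: b :: ts) := by
  cases ts with
  | nil => simp [joinB]
  | cons t ts => simp [joinB]

-- result of A's loop from an arbitrary state, expressed via B's pieces
def glueAB (e l : List Char) : List Char :=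
  joinB ((if e ++ l.filter isNumB = [] then [] else [e ++ l.filter isNumB]) ++ (l.filter isSymB).map tokB)

theorem readA_glue : ∀ (l e : List Char) (hc hs : Bool),
    l.Pairwise (fun x y => (x = 'c' ∨ x = 'd') → y ∉ numCharsA) →
    (hs = true → ∀ y ∈ l, y ∉ numCharsA) →
    (hc = true ↔ e ≠ []) →
    readA l e hc hs = some (glueAB e l) := by
  intro l
  induction l with
  | nil =>
    intro e hc hs _ _ _
    rcases e with _ | ⟨x, xs⟩ <;> simp [readA, glueAB, joinB]
  | cons c rest ih =>
    intro e hc hs hpw hnod hhc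
    rcases List.pairwise_cons.mp hpw with ⟨hhead, htail⟩
    by_cases hnum : c ∈ numCharsA
    · have hs0 : hs = false := by
        cases hs with
        | false => rfl
        | true => exact absurd hnum (hnod rfl c (List.mem_cons_self ..))
      subst hs0
      rw [readA, if_pos hnum, if_neg (by simp)]
      rw [ih (e ++ [c]) true false htail (by simp) (by simp)]
      have hsym : isSymB c = false := num_not_sym c hnum
      have hnb : isNumB c = true := num_isNumB c hnum
      simp [glueAB, hnb, hsym]
    · have hnb : isNumB c = false := by
        cases h : isNumB c
        · rfl
        · exact absurd (isNumB_mem c h) hnum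
      by_cases hcc : c = 'c' ∨ c = 'd'
      · -- symbol step
        have hrest : ∀ y ∈ rest, y ∉ numCharsA := fun y hy => hhead y hy hcc
        have hfr : rest.filter isNumB = [] := by
          apply List.filter_eq_nil_iff.mpr
          intro y hy
          simp only [Bool.not_eq_true]
          cases h : isNumB y
          · rfl
          · exact absurd (isNumB_mem y h) (hrest y hy)
        have hsymc : isSymB c = true := by
          rcases hcc with h | h <;> simp [isSymB, h]
        have hts : (c :: rest).filter isNumB = [] := by
          simp [hnb, hfr]
        have hrec : ∀ tok : List Char, tok ≠ [] → tokB c = tok →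
            readA rest (if !hc then tok else e ++ '*' :: tok) true true =
              some (glueAB e (c :: rest)) := by
          intro tok htok htokB
          cases hc with
          | false =>
            have he : e = [] := by
              by_contra hne
              simpa using hhc.mpr hne
            subst he
            show readA rest tok true true = some (glueAB [] (c :: rest))
            rw [ih tok true true htail (fun _ => hrest) (by simpa using htok)]
            congr 1
            unfold glueAB
            rw [hts, hfr]
            simp [hsymc, htok, htokB]
          | true =>
            have hne : e ≠ [] := hhc.mp rfl
            show readA rest (e ++ '*' :: tok) true true = some (glueAB e (c :: rest))
            rw [ih _ true true htail (fun _ => hrest) (by simp)]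
            congr 1
            unfold glueAB
            have hfs : (c :: rest).filter isSymB = c :: rest.filter isSymB := by
              simp [hsymc]
            rw [hts, hfr, hfs]
            simp only [List.append_nil, List.map_cons, htokB]
            rw [if_neg (by simp), if_neg hne]
            simpa using joinB_merge e tok ((rest.filter isSymB).map tokB)
        rcases hcc with h | h
        · subst h
          rw [readA, if_neg hnum, if_pos rfl]
          exact hrec ['C','A','A','R','D'] (by simp) (by simp [tokB])
        · subst h
          rw [readA, if_neg hnum, if_neg (by decide), if_pos rfl]
          exact hrec ['D','I','M'] (by simp) (by simp [tokB])
      · -- ignored character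
        rw [not_or] at hcc
        have hsymc : isSymB c = false := by
          simp [isSymB, hcc.1, hcc.2]
        rw [readA, if_neg hnum, if_neg hcc.1, if_neg hcc.2]
        rw [ih e hc hs htail (fun h => fun y hy => hnod h y (List.mem_cons_of_mem _ hy)) hhc]
        simp [glueAB, hnb, hsymc]

theorem drop_no_num : ∀ (l : List Char) (i : Nat),
    l.Pairwise (fun x y => (x = 'c' ∨ x = 'd') → y ∉ numCharsA) →
    l.findIdx? isSymB = some i → (l.drop i).any isNumB = false := by
  intro l
  induction l with
  | nil => intro i _ h; simp at h
  | cons c rest ih =>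
    intro i hpw hfind
    rcases List.pairwise_cons.mp hpw with ⟨hhead, htail⟩
    rw [List.findIdx?_cons] at hfind
    by_cases hs : isSymB c = true
    · rw [if_pos hs] at hfind
      obtain rfl : i = 0 := by simpa using hfind.symm
      have hcc : c = 'c' ∨ c = 'd' := by
        rcases (by simpa [isSymB] using hs : c = 'c' ∨ c = 'd') with h | h
        · exact Or.inl h
        · exact Or.inr h
      have hnb : isNumB c = false := by
        rcases hcc with h | h <;> subst h <;> decide
      simp only [List.drop_zero, List.any_cons, hnb, Bool.false_or]
      apply List.any_eq_false.mpr
      intro y hy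
      cases h : isNumB y
      · simp
      · exact absurd (isNumB_mem y h) (hhead y hy hcc)
    · rw [if_neg hs] at hfind
      rcases Option.map_eq_some_iff.mp hfind with ⟨j, hj, rfl⟩
      simpa using ih j htail hj

-- ===== VERDICT (by name: the statement is the Claim_ definition above) =====
theorem read_factors_py_spec : Claim_equal_read_factors_py := by
  intro descr postfix_ _ hpre
  unfold Spec_read_factors_py read_factors_py read_factors_py_alt
  rw [readA_glue descr.toList [] false false hpre (by simp) (by simp)]
  have hglue : glueAB [] descr.toList = buildB descr.toList := by
    unfold glueAB buildB
    simp
  cases hfind : descr.toList.findIdx? isSymB with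
  | none => simp [hfind, hglue]
  | some i =>
    have hno : (descr.toList.drop i).any isNumB = false := drop_no_num descr.toList i hpre hfind
    simp [hfind, hglue, hno]
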